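-- pv_equiv track=rewrite | github.com/shivangsharma08/Codechef-Contests | CZEN2020/ALCHH.py | isConsec
-- ===== SOURCE A (Python) =====
-- def vow(let):
--     return ((let == 'A') or (let == 'E') or
--             (let == 'I') or (let == 'O') or
--             (let == 'U'))
--
-- def isConsec(s):
--     vc = 0
--     for x in s:
--         if vow(x):
--             vc += 1
--             if(vc>=3):
--                 return True
--         else:
--             vc=0
--     return False
-- ===== SOURCE B (Python) =====
-- def vow(let):
--     return ((let == 'A') or (let == 'E') or
--             (let == 'I') or (let == 'O') or
--             (let == 'U'))
--
-- def isConsec(s):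
--     mask = ''.join('1' if c in 'AEIOU' else '0' for c in s)
--     return '111' in mask
-- ===== Notes on version B (the rewrite author's own statement) =====
-- stated objective: idiomatic
-- what changed: Replaces the running vowel counter with reset by a flag-mask transformation of the whole string followed by a substring search for three consecutive vowel flags.
import Mathlib
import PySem

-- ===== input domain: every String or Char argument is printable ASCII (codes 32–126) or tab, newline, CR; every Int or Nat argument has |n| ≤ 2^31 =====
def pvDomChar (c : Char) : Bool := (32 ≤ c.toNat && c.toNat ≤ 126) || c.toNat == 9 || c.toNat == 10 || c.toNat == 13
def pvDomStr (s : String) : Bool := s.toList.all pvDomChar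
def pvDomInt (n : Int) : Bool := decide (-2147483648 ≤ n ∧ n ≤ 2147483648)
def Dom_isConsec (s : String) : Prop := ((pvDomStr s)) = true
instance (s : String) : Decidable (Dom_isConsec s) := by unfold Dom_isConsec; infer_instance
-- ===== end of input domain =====

-- B replaces A's running counter (with reset) by a flag-mask of the string plus a '111' substring test (idiomatic; same cost).

-- ===== PORT A =====
def vowA (let_ : Char) : Bool :=
  (let_ == 'A') || (let_ == 'E') || (let_ == 'I') || (let_ == 'O') || (let_ == 'U')

-- the for-loop with counter vc and early return True
def isConsecLoop : List Char → Nat → Bool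
  | [], _ => false
  | x :: rest, vc =>
    if vowA x then
      if vc + 1 ≥ 3 then true else isConsecLoop rest (vc + 1)
    else
      isConsecLoop rest 0

def isConsec (s : String) : Bool := isConsecLoop s.toList 0

-- ===== PORT B =====
def isConsec_alt (s : String) : Bool :=
  let mask := s.toList.map (fun c => if PySem.Chars.isIn [c] ['A','E','I','O','U'] then '1' else '0')
  PySem.Chars.isIn ['1','1','1'] mask

-- ===== PRECONDITION & SPEC =====
def Spec_isConsec (s : String) (out : Bool) : Prop := out = isConsec_alt s
instance (s : String) (out : Bool) : Decidable (Spec_isConsec s out) := by unfold Spec_isConsec; infer_instance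

-- ===== CLAIM (what is proved, stated in full; the proofs are below) =====
def Claim_equal_isConsec : Prop := ∀ (s : String), Dom_isConsec s → Spec_isConsec s (isConsec s)

-- ===== LEMMAS AND PROOFS =====

def maskOf (cs : List Char) : List Char :=
  cs.map (fun c => if PySem.Chars.isIn [c] ['A','E','I','O','U'] then '1' else '0')

lemma maskOf_cons (c : Char) (cs : List Char) :
    maskOf (c :: cs) = (if vowA c then '1' else '0') :: maskOf cs := by
  simp only [maskOf, List.map_cons]
  congr 1
  by_cases h : vowA c
  · have : PySem.Chars.isIn [c] ['A','E','I','O','U'] = true := by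
      rw [PySem.Chars.isIn_iff_infix]
      simp only [vowA, Bool.or_eq_true, beq_iff_eq] at h
      rcases h with ((((h|h)|h)|h)|h) <;> subst h <;> decide
    simp [this, h]
  · have : PySem.Chars.isIn [c] ['A','E','I','O','U'] = false := by
      rw [PySem.Chars.isIn_eq_false_iff]
      intro hinf
      have hc : c ∈ ['A','E','I','O','U'] := by
        have := hinf.subset (by simp : c ∈ [c])
        exact this
      simp only [vowA, Bool.or_eq_true, beq_iff_eq] at h
      simp only [List.mem_cons] at hc
      tauto
    simp [this, h]

-- characterisation of A's loop in terms of the mask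
lemma loop_eq_infix (cs : List Char) (vc : Nat) (hvc : vc ≤ 2) :
    isConsecLoop cs vc = true ↔
      ['1','1','1'] <:+: (List.replicate vc '1' ++ maskOf cs) := by
  induction cs generalizing vc with
  | nil =>
    simp only [isConsecLoop, maskOf, List.map_nil, List.append_nil]
    constructor
    · intro h; cases h
    · intro h
      have hlen := h.length_le
      simp only [List.length_replicate, List.length_cons, List.length_nil] at hlen
      omega
  | cons x rest ih =>
    rw [maskOf_cons]
    by_cases hv : vowA x
    · simp only [isConsecLoop, hv, if_true]
      by_cases h3 : vc + 1 ≥ 3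
      · have hvc2 : vc = 2 := by omega
        subst hvc2
        simp only [if_pos h3, true_iff]
        exact ⟨[], maskOf rest, by simp⟩
      · have hif : ¬ (vc + 1 ≥ 3) := h3
        rw [if_neg hif, ih (vc + 1) (by omega)]
        -- replicate vc '1' ++ '1' :: maskOf rest = replicate (vc+1) '1' ++ maskOf rest
        have : List.replicate vc '1' ++ ('1' :: maskOf rest)
             = List.replicate (vc + 1) '1' ++ maskOf rest := by
          rw [List.replicate_succ']
          simp
        rw [this]
    · simp only [isConsecLoop, hv, Bool.false_eq_true, if_false]
      rw [ih 0 (by omega)]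
      simp only [List.replicate, List.nil_append]
      constructor
      · intro h
        -- show 111 infix of replicate vc '1' ++ '0' :: maskOf rest gives 111 infix of maskOf rest
        exact (h.trans (List.suffix_cons '0' _).isInfix).trans
          (List.suffix_append (List.replicate vc '1') _).isInfix
      · intro h
        -- any occurrence of 111 cannot use the '0': induct on prefix structure
        interval_cases vc
        · -- vc = 0
          rcases (List.infix_cons_iff.mp (by simpa using h)) with hp | h'
          · exfalso
            rcases hp with ⟨t, ht⟩
            simp only [List.cons_append] at ht
            injection ht with h1 _
            exact absurd h1 (by decide)
          · exact h'
        · rcases (List.infix_cons_iff.mp (by simpa using h)) with hp | h'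
          · exfalso
            rcases hp with ⟨t, ht⟩
            simp only [List.cons_append] at ht
            injection ht with _ ht; injection ht with h2 _
            exact absurd h2 (by decide)
          · rcases (List.infix_cons_iff.mp h') with hp | h''
            · exfalso
              rcases hp with ⟨t, ht⟩
              simp only [List.cons_append] at ht
              injection ht with h1 _
              exact absurd h1 (by decide)
            · exact h''
        · rcases (List.infix_cons_iff.mp (by simpa using h)) with hp | h'
          · exfalso
            rcases hp with ⟨t, ht⟩
            simp only [List.cons_append] at ht
            injection ht with _ ht; injection ht with _ ht; injection ht with h3 _
            exact absurd h3 (by decide)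
          · rcases (List.infix_cons_iff.mp h') with hp | h''
            · exfalso
              rcases hp with ⟨t, ht⟩
              simp only [List.cons_append] at ht
              injection ht with _ ht; injection ht with h2 _
              exact absurd h2 (by decide)
            · rcases (List.infix_cons_iff.mp h'') with hp | h'''
              · exfalso
                rcases hp with ⟨t, ht⟩
                simp only [List.cons_append] at ht
                injection ht with h1 _
                exact absurd h1 (by decide)
              · exact h'''

-- ===== VERDICT (by name: the statement is the Claim_ definition above) =====
theorem isConsec_spec : Claim_equal_isConsec := by
  intro s _
  unfold Spec_isConsec isConsec isConsec_alt
  have hchar := loop_eq_infix s.toList 0 (by omega)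
  simp only [List.replicate, List.nil_append] at hchar
  by_cases h : isConsecLoop s.toList 0 = true
  · rw [h]
    symm
    rw [PySem.Chars.isIn_iff_infix]
    exact hchar.mp h
  · have hf : isConsecLoop s.toList 0 = false := by
      cases hb : isConsecLoop s.toList 0
      · rfl
      · exact absurd hb h
    rw [hf]
    symm
    rw [PySem.Chars.isIn_eq_false_iff]
    intro hinf
    exact h (hchar.mpr hinf)
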